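-- pv_equiv track=rewrite | github.com/Shaharafat/Problem-Solving | codeforces/tram.py | determine_seats
-- ===== SOURCE A (Python) =====
-- def determine_seats(stops_stats):
--     max_pessenger = 0
--     total_passenger = 0
--     for i in range(len(stops_stats)):
--         a, b = stops_stats[i]
--
--         total_passenger -= a
--         total_passenger += b
--         if total_passenger > max_pessenger:
--             max_pessenger = total_passenger
--
--     return max_pessenger
-- ===== SOURCE B (Python) =====
-- def determine_seats(stops_stats):
--     # Back-to-front: peak load of the whole journey = max(0, delta + peak of the rest),
--     # so walk the stops in reverse carrying only the suffix peak, clamped at 0 each step.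
--     peak = 0
--     for a, b in reversed(stops_stats):
--         peak = max(0, (b - a) + peak)
--     return peak
-- ===== Notes on version B (the rewrite author's own statement) =====
-- stated objective: alternative
-- what changed: Replaces A's forward loop carrying a running passenger total plus a running max with a reverse traversal maintaining a single suffix-peak value clamped at 0 each step (peak = max(0, delta + peak)); no cumulative passenger count exists in B.
import Mathlib
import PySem

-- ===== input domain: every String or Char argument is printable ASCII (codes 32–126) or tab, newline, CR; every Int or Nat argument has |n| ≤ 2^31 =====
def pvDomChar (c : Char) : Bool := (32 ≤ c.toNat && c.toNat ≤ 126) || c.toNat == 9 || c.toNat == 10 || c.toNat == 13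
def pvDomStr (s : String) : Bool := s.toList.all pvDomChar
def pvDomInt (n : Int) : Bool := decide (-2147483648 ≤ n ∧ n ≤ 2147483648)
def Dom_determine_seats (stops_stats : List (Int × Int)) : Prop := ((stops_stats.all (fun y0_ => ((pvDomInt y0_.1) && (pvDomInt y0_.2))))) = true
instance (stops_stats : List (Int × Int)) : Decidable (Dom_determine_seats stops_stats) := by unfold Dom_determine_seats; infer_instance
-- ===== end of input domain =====

-- B replaces A's forward total+max loop with a reverse traversal of a single suffix-peak clamped at 0; same value.

-- ===== PORT A =====
-- A: one forward loop carrying (max_pessenger, total_passenger).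
def determine_seats (stops_stats : List (Int × Int)) : Int :=
  (stops_stats.foldl
    (fun (st : Int × Int) p =>
      let total := st.2 - p.1 + p.2
      (if total > st.1 then total else st.1, total))
    (0, 0)).1

-- ===== PORT B =====
-- B: loop over reversed(stops_stats), peak = max(0, (b - a) + peak), start 0.
def determine_seats_alt (stops_stats : List (Int × Int)) : Int :=
  stops_stats.reverse.foldl (fun peak p => max 0 ((p.2 - p.1) + peak)) 0

-- ===== PRECONDITION & SPEC =====
def Spec_determine_seats (stops_stats : List (Int × Int)) (out : Int) : Prop := out = determine_seats_alt stops_stats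
instance (stops_stats : List (Int × Int)) (out : Int) : Decidable (Spec_determine_seats stops_stats out) := by unfold Spec_determine_seats; infer_instance

-- ===== CLAIM (what is proved, stated in full; the proofs are below) =====
def Claim_equal_determine_seats : Prop := ∀ (stops_stats : List (Int × Int)), Dom_determine_seats stops_stats → Spec_determine_seats stops_stats (determine_seats stops_stats)

-- ===== LEMMAS AND PROOFS =====
-- B's reverse loop satisfies the suffix-peak recursion on cons.
theorem pv_alt_cons (p : Int × Int) (l : List (Int × Int)) :
    determine_seats_alt (p :: l) = max 0 ((p.2 - p.1) + determine_seats_alt l) := by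
  simp [determine_seats_alt, List.foldl_append]

theorem pv_alt_nonneg (l : List (Int × Int)) : 0 ≤ determine_seats_alt l := by
  cases l with
  | nil => simp [determine_seats_alt]
  | cons p l => rw [pv_alt_cons]; exact le_max_left _ _

-- A's loop from state (m, t) with t ≤ m returns max m (t + suffix-peak of the rest).
theorem pv_loop_eq (l : List (Int × Int)) : ∀ (m t : Int), t ≤ m →
    (l.foldl
      (fun (st : Int × Int) p =>
        let total := st.2 - p.1 + p.2
        (if total > st.1 then total else st.1, total))
      (m, t)).1 = max m (t + determine_seats_alt l) := by
  induction l with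
  | nil => intro m t h; simp [determine_seats_alt]; omega
  | cons p l ih =>
    intro m t h
    simp only [List.foldl]
    have ht' : t - p.1 + p.2 ≤ if t - p.1 + p.2 > m then t - p.1 + p.2 else m := by
      split <;> omega
    rw [ih _ _ ht', pv_alt_cons]
    have hnn := pv_alt_nonneg l
    rcases max_cases 0 ((p.2 - p.1) + determine_seats_alt l) with ⟨e, _⟩ | ⟨e, _⟩ <;>
      rw [e] <;> split <;>
      rcases max_cases m (t + determine_seats_alt (p :: l)) with ⟨e2, _⟩ | ⟨e2, _⟩ <;>
      rcases max_cases (t - p.1 + p.2) ((t - p.1 + p.2) + determine_seats_alt l) with ⟨e3, _⟩ | ⟨e3, _⟩ <;>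
      rcases max_cases m ((t - p.1 + p.2) + determine_seats_alt l) with ⟨e4, _⟩ | ⟨e4, _⟩ <;>
      omega

-- ===== VERDICT (by name: the statement is the Claim_ definition above) =====
theorem determine_seats_spec : Claim_equal_determine_seats := by
  intro l _
  unfold Spec_determine_seats determine_seats
  rw [pv_loop_eq l 0 0 le_rfl]
  have := pv_alt_nonneg l
  omega
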